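-- pv_equiv track=rewrite | github.com/openschc/openschc | src/rulemanager.py | _ruleIncluded
-- ===== SOURCE A (Python) =====
-- def _ruleIncluded(r1ID, r1l, r2ID, r2l):
--     """check if a conflict exists between to ruleID (i.e. same first bits equals) """
--     r1 = r1ID << (32-r1l)
--     r2 = r2ID << (32-r2l)
--     l  = min(r1l, r2l)
--
--     for k in range (32-l, 32):
--         if ((r1 & (0x01 << k)) != (r2 & (0x01 << k))):
--             return False
--
--     return True
-- ===== SOURCE B (Python) =====
-- def _ruleIncluded(r1ID, r1l, r2ID, r2l):
--     """check if a conflict exists between to ruleID (i.e. same first bits equals) """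
--     r1 = r1ID << (32 - r1l)
--     r2 = r2ID << (32 - r2l)
--     l = min(r1l, r2l)
--     if l <= 0:
--         return True
--     m = 1 << l
--     return (r1 >> (32 - l)) % m == (r2 >> (32 - l)) % m
-- ===== Notes on version B (the rewrite author's own statement) =====
-- stated objective: simpler
-- what changed: B replaces A's bit-by-bit loop over positions 32-l..31 (with early return) by a single closed-form comparison: the shared top l bits of each shifted rule ID are extracted with one right shift and one modulus and compared at once.
import Mathlib
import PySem

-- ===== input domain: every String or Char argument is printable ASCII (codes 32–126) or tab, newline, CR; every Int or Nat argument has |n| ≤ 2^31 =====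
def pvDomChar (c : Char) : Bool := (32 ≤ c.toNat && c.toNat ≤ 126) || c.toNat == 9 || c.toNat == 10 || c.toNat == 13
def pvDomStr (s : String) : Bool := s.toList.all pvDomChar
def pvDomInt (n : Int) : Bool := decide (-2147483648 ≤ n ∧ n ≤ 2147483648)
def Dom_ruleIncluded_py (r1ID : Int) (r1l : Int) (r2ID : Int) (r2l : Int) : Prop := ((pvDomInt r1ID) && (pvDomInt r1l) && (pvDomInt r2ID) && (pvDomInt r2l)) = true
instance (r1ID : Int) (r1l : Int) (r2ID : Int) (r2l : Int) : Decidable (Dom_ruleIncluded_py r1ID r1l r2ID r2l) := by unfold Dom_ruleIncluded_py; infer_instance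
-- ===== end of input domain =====

-- B replaces A's bit-by-bit loop by a closed-form comparison of the shared top bits
-- (one right shift and one modulus per side); objective: simpler — no loop, no early return.

-- ===== PORT A =====
-- A's 'for k in range(32-l, 32): if (r1 & (1<<k)) != (r2 & (1<<k)): return False' with early return;
-- every k the loop draws is ≥ 0 whenever the range is nonempty under Pre_ (l ≤ 32), so k.toNat is Python-exact
def pvLoopA (r1 r2 : Int) : List Int → Bool
  | [] => true
  | k :: ks =>
    if PySem.Int.band r1 ((1 : Int) <<< k.toNat) ≠ PySem.Int.band r2 ((1 : Int) <<< k.toNat) then false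
    else pvLoopA r1 r2 ks

def ruleIncluded_py (r1ID : Int) (r1l : Int) (r2ID : Int) (r2l : Int) : Bool :=
  let r1 := r1ID <<< (32 - r1l).toNat   -- Python raises ValueError on a negative shift count; Pre_ excludes r1l > 32
  let r2 := r2ID <<< (32 - r2l).toNat
  let l := min r1l r2l
  pvLoopA r1 r2 (PySem.List.pyRange (32 - l) 32 1)

-- ===== PORT B =====
def ruleIncluded_py_alt (r1ID : Int) (r1l : Int) (r2ID : Int) (r2l : Int) : Bool :=
  let r1 := r1ID <<< (32 - r1l).toNat   -- Python raises ValueError on a negative shift count; Pre_ excludes r1l > 32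
  let r2 := r2ID <<< (32 - r2l).toNat
  let l := min r1l r2l
  if l ≤ 0 then true
  else
    let m := (1 : Int) <<< l.toNat
    PySem.Int.mod (r1 >>> (32 - l).toNat) m == PySem.Int.mod (r2 >>> (32 - l).toNat) m

-- ===== PRECONDITION & SPEC =====
-- Pre_ excludes exactly the inputs where the Python A raises ValueError on a negative shift count
-- (r1l > 32 or r2l > 32); A returns normally everywhere else.
def Pre_ruleIncluded_py (r1ID : Int) (r1l : Int) (r2ID : Int) (r2l : Int) : Prop := r1l ≤ 32 ∧ r2l ≤ 32
instance (r1ID : Int) (r1l : Int) (r2ID : Int) (r2l : Int) : Decidable (Pre_ruleIncluded_py r1ID r1l r2ID r2l) := by unfold Pre_ruleIncluded_py; infer_instance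

def pvWitness_ruleIncluded_py : Int × Int × Int × Int := (5, 3, 11, 4)

def Spec_ruleIncluded_py (r1ID : Int) (r1l : Int) (r2ID : Int) (r2l : Int) (out : Bool) : Prop := out = ruleIncluded_py_alt r1ID r1l r2ID r2l
instance (r1ID : Int) (r1l : Int) (r2ID : Int) (r2l : Int) (out : Bool) : Decidable (Spec_ruleIncluded_py r1ID r1l r2ID r2l out) := by unfold Spec_ruleIncluded_py; infer_instance

-- ===== CLAIM (what is proved, stated in full; the proofs are below) =====
def Claim_equal_ruleIncluded_py : Prop := ∀ (r1ID : Int) (r1l : Int) (r2ID : Int) (r2l : Int), Dom_ruleIncluded_py r1ID r1l r2ID r2l → Pre_ruleIncluded_py r1ID r1l r2ID r2l → Spec_ruleIncluded_py r1ID r1l r2ID r2l (ruleIncluded_py r1ID r1l r2ID r2l)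

-- ===== LEMMAS AND PROOFS =====

-- bit k of the infinite two's-complement representation of x (Python's view of an int's bits)
def pvBit (x : Int) (k : Nat) : Bool :=
  if 0 ≤ x then x.toNat.testBit k else !((-x - 1).toNat.testBit k)

theorem pv_one_shl_eq (k : Nat) : ((1 : Int) <<< k) = ((2 ^ k : Nat) : Int) := by
  rw [Int.shiftLeft_eq]; push_cast; ring

theorem pv_band_pow_eq (x : Int) (k : Nat) :
    PySem.Int.band x ((1 : Int) <<< k) = if pvBit x k then (1 : Int) <<< k else 0 := by
  rw [pv_one_shl_eq]
  unfold PySem.Int.band pvBit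
  by_cases hx : 0 ≤ x
  · rw [if_pos hx, if_pos hx, if_pos (by positivity), Int.toNat_natCast, Nat.and_two_pow]
    cases h : x.toNat.testBit k <;> simp [h]
  · rw [if_neg hx, if_neg hx, if_pos (by positivity), Int.toNat_natCast, Nat.two_pow_and]
    cases h : ((-x - 1).toNat.testBit k) <;> simp [h]

theorem pv_band_pow_eq_iff (x y : Int) (k : Nat) :
    (PySem.Int.band x ((1 : Int) <<< k) = PySem.Int.band y ((1 : Int) <<< k)) ↔ pvBit x k = pvBit y k := by
  have hpos : (0 : Int) < (1 : Int) <<< k := by rw [pv_one_shl_eq]; positivity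
  rw [pv_band_pow_eq, pv_band_pow_eq]
  cases hx : pvBit x k <;> cases hy : pvBit y k <;> simp <;> omega

theorem pv_emod_toNat_testBit (x : Int) (L k : Nat) :
    ((x % ((2 : Int) ^ L)).toNat).testBit k = (decide (k < L) && pvBit x k) := by
  have hPL : ((2 : Int) ^ L) = ((2 ^ L : Nat) : Int) := by push_cast; ring
  by_cases hx : 0 ≤ x
  · obtain ⟨n, rfl⟩ : ∃ n : Nat, x = (n : Int) := ⟨x.toNat, by omega⟩
    rw [hPL, ← Int.natCast_mod, Int.toNat_natCast, Nat.testBit_mod_two_pow]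
    simp [pvBit]
  · set m : Nat := (-x - 1).toNat with hm
    have hx' : x = -(m : Int) - 1 := by omega
    have hlt : m % 2 ^ L < 2 ^ L := Nat.mod_lt _ (by positivity)
    have hmod : x % ((2 : Int) ^ L) = ((2 ^ L - (m % 2 ^ L + 1) : Nat) : Int) := by
      have hdvd : ((2 : Int) ^ L) ∣ (x - ((2 ^ L - (m % 2 ^ L + 1) : Nat) : Int)) := by
        refine ⟨-((m / 2 ^ L : Nat) : Int) - 1, ?_⟩
        have hdm : (2 ^ L : Int) * ((m / 2 ^ L : Nat) : Int) + ((m % 2 ^ L : Nat) : Int) = (m : Int) := by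
          exact_mod_cast Nat.div_add_mod m (2 ^ L)
        have hsub : ((2 ^ L - (m % 2 ^ L + 1) : Nat) : Int) = (2 ^ L : Int) - ((m % 2 ^ L : Nat) : Int) - 1 := by
          have : m % 2 ^ L + 1 ≤ 2 ^ L := hlt
          push_cast [Nat.cast_sub this]
          ring
        rw [hx', hsub]
        linear_combination hdm
      have h0 : (0 : Int) ≤ ((2 ^ L - (m % 2 ^ L + 1) : Nat) : Int) := by positivity
      have h3 : ((2 ^ L - (m % 2 ^ L + 1) : Nat) : Int) < (2 : Int) ^ L := by
        have : (2 ^ L - (m % 2 ^ L + 1) : Nat) < 2 ^ L := by omega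
        calc ((2 ^ L - (m % 2 ^ L + 1) : Nat) : Int) < ((2 ^ L : Nat) : Int) := by exact_mod_cast this
          _ = (2 : Int) ^ L := by push_cast; ring
      calc x % ((2 : Int) ^ L)
          = ((2 ^ L - (m % 2 ^ L + 1) : Nat) : Int) % ((2 : Int) ^ L) :=
            Int.emod_eq_emod_iff_emod_sub_eq_zero.mpr (Int.emod_eq_zero_of_dvd hdvd)
        _ = ((2 ^ L - (m % 2 ^ L + 1) : Nat) : Int) := Int.emod_eq_of_lt h0 h3
    rw [hmod, Int.toNat_natCast]
    have h2ps : (2 ^ L - (m % 2 ^ L + 1)).testBit k = (decide (k < L) && !(m % 2 ^ L).testBit k) :=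
      Nat.testBit_two_pow_sub_succ hlt k
    rw [h2ps, Nat.testBit_mod_two_pow]
    have hpb : pvBit x k = !m.testBit k := by simp [pvBit, hx, hm]
    rw [hpb]
    by_cases hk : k < L <;> simp [hk]

theorem pv_emod_two_pow_eq_iff (x y : Int) (L : Nat) :
    (x % ((2 : Int) ^ L) = y % ((2 : Int) ^ L)) ↔ ∀ k, k < L → pvBit x k = pvBit y k := by
  constructor
  · intro h k hk
    have := congrArg (fun z => z.toNat.testBit k) h
    simpa [pv_emod_toNat_testBit, hk] using this
  · intro h
    have hx0 : (0 : Int) ≤ x % ((2 : Int) ^ L) := Int.emod_nonneg _ (by positivity)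
    have hy0 : (0 : Int) ≤ y % ((2 : Int) ^ L) := Int.emod_nonneg _ (by positivity)
    have hnat : (x % ((2 : Int) ^ L)).toNat = (y % ((2 : Int) ^ L)).toNat := by
      refine Nat.eq_of_testBit_eq fun k => ?_
      rw [pv_emod_toNat_testBit, pv_emod_toNat_testBit]
      by_cases hk : k < L
      · simp [hk, h k hk]
      · simp [hk]
    omega

theorem pv_pvBit_shiftRight (x : Int) (s k : Nat) : pvBit (x >>> s) k = pvBit x (s + k) := by
  rcases x with n | m
  · rw [show (Int.ofNat n) >>> s = ((n >>> s : Nat) : Int) from rfl,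
       show Int.ofNat n = ((n : Nat) : Int) from rfl]
    rw [pvBit, pvBit, if_pos (Int.natCast_nonneg _), if_pos (Int.natCast_nonneg _),
       Int.toNat_natCast, Int.toNat_natCast, Nat.testBit_shiftRight]
  · rw [show (Int.negSucc m) >>> s = Int.negSucc (m >>> s) from rfl]
    have e1 : (-(Int.negSucc (m >>> s)) - 1) = ((m >>> s : Nat) : Int) := by
      rw [Int.negSucc_eq]; ring
    have e2 : (-(Int.negSucc m) - 1) = ((m : Nat) : Int) := by
      rw [Int.negSucc_eq]; ring
    rw [pvBit, pvBit, if_neg (not_le.mpr (Int.negSucc_lt_zero _)),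
       if_neg (not_le.mpr (Int.negSucc_lt_zero _)), e1, e2,
       Int.toNat_natCast, Int.toNat_natCast, Nat.testBit_shiftRight]

theorem pvLoopA_eq_true_iff (r1 r2 : Int) (ks : List Int) :
    pvLoopA r1 r2 ks = true ↔
      ∀ k ∈ ks, PySem.Int.band r1 ((1 : Int) <<< k.toNat) = PySem.Int.band r2 ((1 : Int) <<< k.toNat) := by
  induction ks with
  | nil => simp [pvLoopA]
  | cons k ks ih =>
    by_cases h : PySem.Int.band r1 ((1 : Int) <<< k.toNat) = PySem.Int.band r2 ((1 : Int) <<< k.toNat)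
    · simp [pvLoopA, h, ih]
    · simp [pvLoopA, h]

theorem pv_mod_shl_eq_emod (z : Int) (L : Nat) :
    PySem.Int.mod z ((1 : Int) <<< L) = z % ((2 : Int) ^ L) := by
  have h : ((1 : Int) <<< L) = (2 : Int) ^ L := by rw [Int.shiftLeft_eq]; ring
  rw [h]
  simp [PySem.Int.mod, Int.fmod_eq_emod]

-- ===== VERDICT (by name: the statement is the Claim_ definition above) =====
theorem ruleIncluded_py_spec : Claim_equal_ruleIncluded_py := by
  intro r1ID r1l r2ID r2l _hdom hpre
  obtain ⟨h1, h2⟩ := hpre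
  unfold Spec_ruleIncluded_py ruleIncluded_py ruleIncluded_py_alt
  simp only []
  set a := r1ID <<< (32 - r1l).toNat with ha
  set b := r2ID <<< (32 - r2l).toNat with hb
  set l := min r1l r2l with hl
  have hl32 : l ≤ 32 := by omega
  by_cases hl0 : l ≤ 0
  · have hempty : PySem.List.pyRange (32 - l) 32 1 = [] := by
      rw [PySem.List.pyRange_one]
      have : (32 - (32 - l)).toNat = 0 := by omega
      rw [this]
      simp
    rw [hempty, if_pos hl0]
    rfl
  · replace hl0 : 0 < l := by omega
    rw [if_neg (by omega)]
    set L := l.toNat with hL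
    have hlL : l = (L : Int) := by omega
    have hsL : (32 - l).toNat = 32 - L := by omega
    have hLle : L ≤ 32 := by omega
    rw [hsL, pv_mod_shl_eq_emod, pv_mod_shl_eq_emod]
    rw [Bool.eq_iff_iff, pvLoopA_eq_true_iff, beq_iff_eq, pv_emod_two_pow_eq_iff]
    constructor
    · intro h k hk
      have hmem : ((32 - L + k : Nat) : Int) ∈ PySem.List.pyRange (32 - l) 32 1 := by
        rw [PySem.List.mem_pyRange_one]
        omega
      have := h _ hmem
      rw [pv_band_pow_eq_iff] at this
      have htn : ((32 - L + k : Nat) : Int).toNat = (32 - L) + k := by omega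
      rw [htn] at this
      rw [pv_pvBit_shiftRight, pv_pvBit_shiftRight]
      exact this
    · intro h k hkmem
      rw [PySem.List.mem_pyRange_one] at hkmem
      rw [pv_band_pow_eq_iff]
      have hk0 : (0 : Int) ≤ k := by omega
      have hsplit : k.toNat = (32 - L) + (k.toNat - (32 - L)) := by omega
      rw [hsplit]
      have := h (k.toNat - (32 - L)) (by omega)
      rw [pv_pvBit_shiftRight, pv_pvBit_shiftRight] at this
      exact this
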